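-- pv_equiv track=rewrite | github.com/pedrohnsc2/marley-v2 | vaccine_platforms/shared/validators.py | check_restriction_sites
-- ===== SOURCE A (Python) =====
-- def check_restriction_sites(
--     dna: str,
--     sites: dict[str, str] | None = None,
-- ) -> list[str]:
--     """Busca sitios de restricao indesejados na sequencia de DNA.
--
--     Sitios de restricao dentro da CDS podem causar problemas durante
--     a clonagem. Esta funcao verifica a presenca de enzimas comuns
--     usadas em vetores de expressao.
--
--     Se nenhum dicionario de sitios for fornecido, usa um conjunto
--     padrao de enzimas comuns em clonagem molecular.
--
--     Args:
--         dna: sequencia de DNA a ser verificada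
--         sites: dicionario {nome_enzima: sequencia_de_reconhecimento}
--
--     Returns:
--         Lista de nomes de enzimas cujos sitios foram encontrados
--     """
--     # Sitios de restricao comuns em vetores de expressao (clonagem)
--     default_sites: dict[str, str] = {
--         "EcoRI": "GAATTC",
--         "BamHI": "GGATCC",
--         "HindIII": "AAGCTT",
--         "NdeI": "CATATG",
--         "XhoI": "CTCGAG",
--         "NcoI": "CCATGG",
--         "BglII": "AGATCT",
--         "SalI": "GTCGAC",
--         "NotI": "GCGGCCGC",
--         "XbaI": "TCTAGA",
--         "SpeI": "ACTAGT",
--         "KpnI": "GGTACC",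
--         "SacI": "GAGCTC",
--         "PstI": "CTGCAG",
--         "ApaI": "GGGCCC",
--         "BsaI": "GGTCTC",
--         "BbsI": "GAAGAC",
--     }
--
--     if sites is None:
--         sites = default_sites
--
--     dna = dna.upper().strip()
--     found: list[str] = []
--
--     for enzyme, recognition_seq in sites.items():
--         recognition_seq = recognition_seq.upper()
--         if recognition_seq in dna:
--             found.append(enzyme)
--
--     return sorted(found)
-- ===== SOURCE B (Python) =====
-- def check_restriction_sites(
--     dna: str,
--     sites: dict[str, str] | None = None,
-- ) -> list[str]:
--     """Substring-index re-implementation: precompute, for each distinct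
--     recognition-sequence length L, the set of all windows dna[i:i+L];
--     each enzyme then costs one set lookup instead of a substring scan."""
--     default_sites: dict[str, str] = {
--         "EcoRI": "GAATTC",
--         "BamHI": "GGATCC",
--         "HindIII": "AAGCTT",
--         "NdeI": "CATATG",
--         "XhoI": "CTCGAG",
--         "NcoI": "CCATGG",
--         "BglII": "AGATCT",
--         "SalI": "GTCGAC",
--         "NotI": "GCGGCCGC",
--         "XbaI": "TCTAGA",
--         "SpeI": "ACTAGT",
--         "KpnI": "GGTACC",
--         "SacI": "GAGCTC",
--         "PstI": "CTGCAG",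
--         "ApaI": "GGGCCC",
--         "BsaI": "GGTCTC",
--         "BbsI": "GAAGAC",
--     }
--
--     if sites is None:
--         sites = default_sites
--
--     dna = dna.upper().strip()
--     targets = [(name, seq.upper()) for name, seq in sites.items()]
--     n = len(dna)
--
--     windows: dict[int, set[str]] = {}
--     for length in {len(seq) for _, seq in targets}:
--         windows[length] = {dna[i:i + length] for i in range(n - length + 1)}
--
--     found = [name for name, seq in targets if seq in windows[len(seq)]]
--     return sorted(found)
-- ===== Notes on version B (the rewrite author's own statement) =====
-- stated objective: alternative
-- what changed: Instead of running a substring search over the DNA for every enzyme, B builds once, for each distinct recognition-sequence length L, the set of all windows dna[i:i+L], and then decides each enzyme by a single set lookup.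
import Mathlib
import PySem

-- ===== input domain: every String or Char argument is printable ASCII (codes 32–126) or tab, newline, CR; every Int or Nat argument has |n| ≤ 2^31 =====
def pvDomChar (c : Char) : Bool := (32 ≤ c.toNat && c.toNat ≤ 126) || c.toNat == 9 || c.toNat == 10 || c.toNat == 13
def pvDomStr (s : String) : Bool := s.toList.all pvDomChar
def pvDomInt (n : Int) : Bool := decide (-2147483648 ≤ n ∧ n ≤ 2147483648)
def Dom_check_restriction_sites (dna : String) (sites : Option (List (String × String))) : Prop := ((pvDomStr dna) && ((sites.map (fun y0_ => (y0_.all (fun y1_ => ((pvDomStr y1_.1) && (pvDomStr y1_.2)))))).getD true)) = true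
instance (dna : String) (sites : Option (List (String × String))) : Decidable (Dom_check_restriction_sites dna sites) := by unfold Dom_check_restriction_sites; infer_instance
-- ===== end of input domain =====

-- ===== PORT A =====
-- B replaces each enzyme's substring scan of the DNA by one lookup in a precomputed
-- per-length set of all DNA windows (objective: alternative decomposition via a substring index).
-- Shared literal: the default_sites table both Pythons carry verbatim.
def pvDefaultSites : List (String × String) :=
  [("EcoRI", "GAATTC"), ("BamHI", "GGATCC"), ("HindIII", "AAGCTT"), ("NdeI", "CATATG"),
   ("XhoI", "CTCGAG"), ("NcoI", "CCATGG"), ("BglII", "AGATCT"), ("SalI", "GTCGAC"),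
   ("NotI", "GCGGCCGC"), ("XbaI", "TCTAGA"), ("SpeI", "ACTAGT"), ("KpnI", "GGTACC"),
   ("SacI", "GAGCTC"), ("PstI", "CTGCAG"), ("ApaI", "GGGCCC"), ("BsaI", "GGTCTC"),
   ("BbsI", "GAAGAC")]

-- Port of A. The `sites` parameter is a Python dict: PySem.Dict.ofList models its
-- construction (later duplicate keys overwrite in place), `.items` its iteration order.
def check_restriction_sites (dna : String) (sites : Option (List (String × String))) : List String :=
  let sitesL := sites.getD pvDefaultSites
  let d := PySem.Dict.ofList sitesL
  let dna2 := PySem.Str.strip (PySem.Str.upper dna)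
  let found := d.items.foldl
    (fun found p => if PySem.Str.isIn (PySem.Str.upper p.2) dna2 then found ++ [p.1] else found)
    ([] : List String)
  PySem.List.sorted found (fun x => x) false

-- ===== PORT B =====
-- Port of B (Source B): uppercase the targets once, build for each distinct pattern length L
-- the set of all windows dna[i:i+L], then test each enzyme by one set lookup.
-- (Python's windows[len(seq)] always finds its key; getD's default is never reached.)
def check_restriction_sites_alt (dna : String) (sites : Option (List (String × String))) : List String :=
  let sitesL := sites.getD pvDefaultSites
  let d := PySem.Dict.ofList sitesL
  let dna2 := PySem.Str.strip (PySem.Str.upper dna)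
  let targets := d.items.map (fun p => (p.1, PySem.Str.upper p.2))
  let n := PySem.Str.len dna2
  let lengths : PySem.Set Int := PySem.Set.ofList (targets.map (fun p => PySem.Str.len p.2))
  let windows : PySem.Dict Int (PySem.Set String) := lengths.foldl
    (fun w L => w.insert L (PySem.Set.ofList
      ((PySem.List.pyRange 0 (n - L + 1)).map (fun i => PySem.Str.slice dna2 (some i) (some (i + L))))))
    PySem.Dict.empty
  let found := targets.foldl
    (fun found p => if (windows.getD (PySem.Str.len p.2) PySem.Set.empty).contains p.2 then found ++ [p.1] else found)
    ([] : List String)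
  PySem.List.sorted found (fun x => x) false

-- ===== PRECONDITION & SPEC =====
def Spec_check_restriction_sites (dna : String) (sites : Option (List (String × String))) (out : List String) : Prop := out = check_restriction_sites_alt dna sites
instance (dna : String) (sites : Option (List (String × String))) (out : List String) : Decidable (Spec_check_restriction_sites dna sites out) := by unfold Spec_check_restriction_sites; infer_instance

-- ===== CLAIM (what is proved, stated in full; the proofs are below) =====
def Claim_equal_check_restriction_sites : Prop := ∀ (dna : String) (sites : Option (List (String × String))), Dom_check_restriction_sites dna sites → Spec_check_restriction_sites dna sites (check_restriction_sites dna sites)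

-- ===== LEMMAS AND PROOFS =====

-- the window set B builds for pattern length L over string s
def pvWin (s : String) (L : Int) : PySem.Set String :=
  PySem.Set.ofList
    ((PySem.List.pyRange 0 (PySem.Str.len s - L + 1)).map
      (fun i => PySem.Str.slice s (some i) (some (i + L))))

theorem pvStr_toList_slice (s : String) (a b : Option Int) :
    (PySem.Str.slice s a b).toList = PySem.List.slice s.toList a b := by
  simp [PySem.Str.slice]

-- membership of a pattern t in the window set of its own length is substring search
theorem pvWin_contains (s t : String) :
    (pvWin s (PySem.Str.len t)).contains t = PySem.Str.isIn t s := by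
  rw [Bool.eq_iff_iff, PySem.Set.contains_iff, PySem.Str.isIn_eq,
    ← PySem.Chars.exists_prefix_drop_iff_isIn]
  unfold pvWin
  rw [PySem.Set.mem_ofList, List.mem_map]
  constructor
  · rintro ⟨i, hi, hsl⟩
    rw [PySem.List.mem_pyRange_one] at hi
    obtain ⟨h0, _⟩ := hi
    lift i to ℕ using h0 with k
    refine ⟨k, ?_⟩
    have h := congrArg String.toList hsl
    rw [pvStr_toList_slice, PySem.Str.len_eq, PySem.List.slice_natCast_add] at h
    rw [List.prefix_iff_eq_take]
    exact h.symm
  · rintro ⟨j, hpre⟩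
    by_cases hj : j ≤ s.toList.length
    · have hlen : t.toList.length ≤ s.toList.length - j := by
        simpa using hpre.length_le
      refine ⟨(j : Int), ?_, ?_⟩
      · rw [PySem.List.mem_pyRange_one, PySem.Str.len_eq, PySem.Str.len_eq]
        constructor
        · positivity
        · omega
      · apply String.toList_inj.mp
        rw [pvStr_toList_slice, PySem.Str.len_eq, PySem.List.slice_natCast_add]
        exact (List.prefix_iff_eq_take.mp hpre).symm
    · have hdrop : s.toList.drop j = [] := List.drop_eq_nil_of_le (by omega)
      rw [hdrop] at hpre
      have ht : t.toList = [] := List.prefix_nil.mp hpre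
      refine ⟨0, ?_, ?_⟩
      · rw [PySem.List.mem_pyRange_one, PySem.Str.len_eq s, PySem.Str.len_eq t, ht]
        constructor
        · exact le_refl 0
        · simp only [List.length_nil, Nat.cast_zero]; omega
      · apply String.toList_inj.mp
        rw [pvStr_toList_slice, PySem.Str.len_eq, ht]
        simp [pysem]

-- looking up any length of `lens` in the fold-built windows dict yields its window set
theorem pvWindows_getD (s : String) (lens : List Int) (hnd : lens.Nodup) {L : Int} (hL : L ∈ lens) :
    ((lens.foldl (fun w L => w.insert L (pvWin s L)) PySem.Dict.empty).getD L PySem.Set.empty)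
      = pvWin s L := by
  have hfresh : ∀ a ∈ lens, (PySem.Dict.empty : PySem.Dict Int (PySem.Set String)).contains (id a) = false :=
    fun a _ => PySem.Dict.contains_empty a
  have hitems := PySem.Dict.items_foldl_insert_fresh lens id (pvWin s) PySem.Dict.empty hfresh
    (by simpa using hnd)
  simp only [id] at hitems
  have hkeys : (lens.foldl (fun w L => w.insert L (pvWin s L)) PySem.Dict.empty).keys.Nodup := by
    simp only [PySem.Dict.keys, hitems]
    simpa [PySem.Dict.empty, Function.comp_def] using hnd
  exact PySem.Dict.getD_of_mem_items _
    (by rw [hitems]; simp [PySem.Dict.empty]; exact hL) hkeys _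

-- the condition B evaluates for a pattern t equals A's substring test
theorem pv_cond (s : String) (lens : List Int) (hnd : lens.Nodup) {t : String}
    (ht : PySem.Str.len t ∈ lens) :
    ((lens.foldl (fun w L => w.insert L (PySem.Set.ofList
        ((PySem.List.pyRange 0 (PySem.Str.len s - L + 1)).map
          (fun i => PySem.Str.slice s (some i) (some (i + L)))))) PySem.Dict.empty).getD
      (PySem.Str.len t) PySem.Set.empty).contains t = PySem.Str.isIn t s := by
  rw [show (fun (w : PySem.Dict Int (PySem.Set String)) (L : Int) => w.insert L (PySem.Set.ofList
        ((PySem.List.pyRange 0 (PySem.Str.len s - L + 1)).map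
          (fun i => PySem.Str.slice s (some i) (some (i + L))))))
      = fun w L => w.insert L (pvWin s L) from rfl]
  rw [pvWindows_getD s lens hnd ht, pvWin_contains]

theorem pv_main (dna : String) (sites : Option (List (String × String))) :
    check_restriction_sites dna sites = check_restriction_sites_alt dna sites := by
  simp only [check_restriction_sites, check_restriction_sites_alt]
  apply congrArg (fun l : List String => PySem.List.sorted l (fun x => x) false)
  rw [PySem.List.foldl_append_if, PySem.List.foldl_append_if]
  simp only [List.nil_append, List.filter_map, List.map_map, Function.comp_def]
  apply congrArg
  apply List.filter_congr
  intro p hp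
  exact (pv_cond (PySem.Str.strip (PySem.Str.upper dna)) _ (PySem.Set.nodup_ofList _)
    (by rw [PySem.Set.mem_ofList]; exact List.mem_map.mpr ⟨p, hp, rfl⟩)).symm

-- ===== VERDICT (by name: the statement is the Claim_ definition above) =====
theorem check_restriction_sites_spec : Claim_equal_check_restriction_sites := by
  intro dna sites _
  exact (pv_main dna sites).symm ▸ rfl
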